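-- pv_equiv track=rewrite | github.com/6puritans9/codetree-TILs | 241219/사다리 타기/ladder-game.py | backtrack
-- ===== SOURCE A (Python) =====
-- def simulate(lines, n):
--     """Simulates the ladder game."""
--     result = [i for i in range(n + 1)]  # Initialize result with a placeholder 0 for alignment
--
--     # Process lines sorted by depth
--     for start, depth in sorted(lines, key=lambda x: x[1]):
--         if start < n:  # Ensure bounds
--             result[start], result[start + 1] = result[start + 1], result[start]
--
--     return result
--
-- def backtrack(all_lines, idx, target, cur_lines, min_cost, n, m):
--     """Recursive function to find the minimum lines."""
--     # Base case: all lines processed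
--     if idx == m:
--         if simulate(cur_lines, n) == target:
--             return min(min_cost, len(cur_lines))
--         return min_cost
--
--     # Pruning: Stop if the current subset exceeds the best solution so far
--     if len(cur_lines) >= min_cost:
--         return min_cost
--
--     # Recursive case: Try including and excluding the current line
--     # Include the current line
--     min_cost = backtrack(all_lines, idx + 1, target, cur_lines + [all_lines[idx]], min_cost, n, m)
--     # Exclude the current line
--     min_cost = backtrack(all_lines, idx + 1, target, cur_lines, min_cost, n, m)
--
--     return min_cost
-- ===== SOURCE B (Python) =====
-- def simulate(lines, n):
--     """Simulates the ladder game."""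
--     result = [i for i in range(n + 1)]  # Initialize result with a placeholder 0 for alignment
--
--     # Process lines sorted by depth
--     for start, depth in sorted(lines, key=lambda x: x[1]):
--         if start < n:  # Ensure bounds
--             result[start], result[start + 1] = result[start + 1], result[start]
--
--     return result
--
--
-- def backtrack(all_lines, idx, target, cur_lines, min_cost, n, m):
--     """Iterative bitmask enumeration over all subsets of the remaining lines."""
--     window = all_lines[idx:m]
--     best = min_cost
--     for mask in range(2 ** len(window)):
--         candidate = cur_lines + [line for j, line in enumerate(window) if (mask >> j) & 1]
--         if len(candidate) >= best:
--             continue  # cannot improve on the best length found so far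
--         if simulate(candidate, n) == target:
--             best = min(best, len(candidate))
--     return best
-- ===== Notes on version B (the rewrite author's own statement) =====
-- stated objective: alternative
-- what changed: Replaces A's include/exclude recursion with min_cost threading and pruning by a flat iterative bitmask enumeration: every subset of the remaining lines all_lines[idx:m] is built from a mask in range(2**len(window)), simulated once, and folded into best with min.
-- outside the precondition, e.g. on backtrack([(0, 1), (1, 2)], -1, [1, 0, 2], [], 9, 2, 2): A returns 1, B returns 9
import Mathlib
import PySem

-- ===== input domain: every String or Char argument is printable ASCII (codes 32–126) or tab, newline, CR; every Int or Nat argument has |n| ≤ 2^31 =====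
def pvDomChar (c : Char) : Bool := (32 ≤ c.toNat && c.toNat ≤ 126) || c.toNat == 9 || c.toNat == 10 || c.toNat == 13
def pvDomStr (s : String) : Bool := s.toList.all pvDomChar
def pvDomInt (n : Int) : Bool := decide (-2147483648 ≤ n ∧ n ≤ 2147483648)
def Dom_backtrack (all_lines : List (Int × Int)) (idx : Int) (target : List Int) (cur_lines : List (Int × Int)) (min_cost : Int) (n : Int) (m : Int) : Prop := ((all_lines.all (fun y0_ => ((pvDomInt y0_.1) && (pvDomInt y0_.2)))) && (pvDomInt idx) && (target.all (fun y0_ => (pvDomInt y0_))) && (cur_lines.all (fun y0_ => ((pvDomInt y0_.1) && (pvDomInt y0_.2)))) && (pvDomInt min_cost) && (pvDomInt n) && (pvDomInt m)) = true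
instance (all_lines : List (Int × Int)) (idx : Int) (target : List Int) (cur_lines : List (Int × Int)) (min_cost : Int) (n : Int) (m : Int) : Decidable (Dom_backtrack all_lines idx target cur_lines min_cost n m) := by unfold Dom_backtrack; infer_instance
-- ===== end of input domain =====

-- B replaces A's include/exclude recursion (with pruning) by an iterative bitmask
-- enumeration of the subsets of the remaining lines; equal return values, no speed claim.

-- ===== PORT A =====
-- simulate(lines, n): shared helper, identical in Source A and Source B.
-- The tuple swap result[start], result[start+1] = result[start+1], result[start] is ported by
-- reading both cells first (pyGet?, Python negative indexing) and then writing them (pySetD);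
-- the 'no value' fallback keeps `result` unchanged exactly where Python raises IndexError
-- (those inputs are excluded by Pre_backtrack).
def simulate (lines : List (Int × Int)) (n : Int) : List Int :=
  let result : List Int := (List.range (n + 1).toNat).map (fun i => (i : Int))
  (PySem.List.sorted lines (fun x => x.2)).foldl
    (fun result sd =>
      if sd.1 < n then
        match PySem.List.pyGet? result (sd.1 + 1), PySem.List.pyGet? result sd.1 with
        | some a, some b => PySem.List.pySetD (PySem.List.pySetD result sd.1 a) (sd.1 + 1) b
        | _, _ => result
      else result)
    result

-- A's recursion terminates through idx reaching m; fuel (m - idx).toNat makes that structural.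
-- The fuel-0 and index-out-of-range fallbacks are unreachable under Pre_backtrack.
def backtrackFuel (fuel : Nat) (all_lines : List (Int × Int)) (idx : Int) (target : List Int) (cur_lines : List (Int × Int)) (min_cost : Int) (n : Int) (m : Int) : Int :=
  if idx = m then
    (if simulate cur_lines n = target then min min_cost (cur_lines.length : Int) else min_cost)
  else if min_cost ≤ (cur_lines.length : Int) then min_cost
  else
    match fuel with
    | 0 => min_cost
    | fuel + 1 =>
      let line := (PySem.List.pyGet? all_lines idx).getD (0, 0)
      let mc1 := backtrackFuel fuel all_lines (idx + 1) target (cur_lines ++ [line]) min_cost n m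
      backtrackFuel fuel all_lines (idx + 1) target cur_lines mc1 n m

def backtrack (all_lines : List (Int × Int)) (idx : Int) (target : List Int) (cur_lines : List (Int × Int)) (min_cost : Int) (n : Int) (m : Int) : Int :=
  backtrackFuel (m - idx).toNat all_lines idx target cur_lines min_cost n m

-- ===== PORT B =====
-- Source B: window = all_lines[idx:m]; for mask in range(2 ** len(window)) build the candidate
-- cur_lines + [line for j, line in enumerate(window) if (mask >> j) & 1], skip it when it is
-- already as long as the best length found, otherwise simulate it and keep the best.
def backtrack_alt (all_lines : List (Int × Int)) (idx : Int) (target : List Int) (cur_lines : List (Int × Int)) (min_cost : Int) (n : Int) (m : Int) : Int :=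
  let window := PySem.List.slice all_lines (some idx) (some m)
  (List.range (2 ^ window.length)).foldl
    (fun best mask =>
      let candidate := cur_lines ++
        (PySem.List.enumerate window).filterMap
          (fun jl => if (mask >>> jl.1.toNat) % 2 = 1 then some jl.2 else none)
      if best ≤ (candidate.length : Int) then best
      else if simulate candidate n = target then min best (candidate.length : Int) else best)
    min_cost

-- ===== PRECONDITION & SPEC =====
-- Pre_ excludes exactly the inputs where Python raises IndexError (a line start below -(n+1)
-- inside simulate, or the recursion running past the end of all_lines), plus the calls with a
-- negative idx, on which A's value comes from Python's negative-index wraparound (all_lines[idx]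
-- re-reads lines from the end of the list); both exclusions are degenerate calls outside the
-- function's natural domain 0 ≤ idx ≤ m ≤ len(all_lines) (the second disjuncts keep the calls
-- that return immediately — idx == m, or a pruned call with len(cur_lines) ≥ min_cost).
def Pre_backtrack (all_lines : List (Int × Int)) (idx : Int) (target : List Int) (cur_lines : List (Int × Int)) (min_cost : Int) (n : Int) (m : Int) : Prop :=
  (∀ p ∈ PySem.List.slice all_lines (some idx) (some m) ++ cur_lines,
      p.1 < n → 0 ≤ n ∧ -(n + 1) ≤ p.1) ∧
  (idx = m ∨ min_cost ≤ (cur_lines.length : Int) ∨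
    (0 ≤ idx ∧ idx ≤ m ∧ m ≤ (all_lines.length : Int)))
instance (all_lines : List (Int × Int)) (idx : Int) (target : List Int) (cur_lines : List (Int × Int)) (min_cost : Int) (n : Int) (m : Int) : Decidable (Pre_backtrack all_lines idx target cur_lines min_cost n m) := by unfold Pre_backtrack; infer_instance

def pvWitness_backtrack : (List (Int × Int)) × Int × List Int × (List (Int × Int)) × Int × Int × Int :=
  ([(0, 1)], 0, [1, 0], [], 3, 1, 1)

def Spec_backtrack (all_lines : List (Int × Int)) (idx : Int) (target : List Int) (cur_lines : List (Int × Int)) (min_cost : Int) (n : Int) (m : Int) (out : Int) : Prop := out = backtrack_alt all_lines idx target cur_lines min_cost n m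
instance (all_lines : List (Int × Int)) (idx : Int) (target : List Int) (cur_lines : List (Int × Int)) (min_cost : Int) (n : Int) (m : Int) (out : Int) : Decidable (Spec_backtrack all_lines idx target cur_lines min_cost n m out) := by unfold Spec_backtrack; infer_instance

-- ===== CLAIM (what is proved, stated in full; the proofs are below) =====
def Claim_equal_backtrack : Prop := ∀ (all_lines : List (Int × Int)) (idx : Int) (target : List Int) (cur_lines : List (Int × Int)) (min_cost : Int) (n : Int) (m : Int), Dom_backtrack all_lines idx target cur_lines min_cost n m → Pre_backtrack all_lines idx target cur_lines min_cost n m → Spec_backtrack all_lines idx target cur_lines min_cost n m (backtrack all_lines idx target cur_lines min_cost n m)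

-- ===== LEMMAS AND PROOFS =====

-- The common step: try one subset S of the remaining lines against the target.
def stepF (n : Int) (target : List Int) (cur : List (Int × Int)) (b : Int) (S : List (Int × Int)) : Int :=
  if simulate (cur ++ S) n = target then min b ((cur ++ S).length : Int) else b

-- All subsets of a list, in A's include-first order.
def subsetsOf : List (Int × Int) → List (List (Int × Int))
  | [] => [[]]
  | x :: xs => (subsetsOf xs).map (x :: ·) ++ subsetsOf xs

-- The subset a bitmask picks, low bit = first element.
def pickBits (mask : Nat) : List (Int × Int) → List (Int × Int)
  | [] => []
  | x :: xs => (if mask % 2 = 1 then [x] else []) ++ pickBits (mask / 2) xs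

theorem stepF_shift (n : Int) (t : List Int) (cur : List (Int × Int)) (x : Int × Int) (b : Int) (S : List (Int × Int)) :
    stepF n t cur b (x :: S) = stepF n t (cur ++ [x]) b S := by
  simp [stepF]

theorem foldl_stepF_map_cons (n : Int) (t : List Int) (cur : List (Int × Int)) (x : Int × Int) (b : Int) (l : List (List (Int × Int))) :
    l.foldl (fun b S => stepF n t cur b (x :: S)) b = l.foldl (stepF n t (cur ++ [x])) b := by
  induction l generalizing b with
  | nil => rfl
  | cons S l ih => simp [List.foldl_cons, stepF_shift]

theorem foldl_stepF_const (n : Int) (t : List Int) (cur : List (Int × Int)) (b : Int)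
    (l : List (List (Int × Int))) (h : b ≤ (cur.length : Int)) :
    l.foldl (stepF n t cur) b = b := by
  induction l with
  | nil => rfl
  | cons S l ih =>
    have hb : stepF n t cur b S = b := by
      unfold stepF
      split
      · have : b ≤ ((cur ++ S).length : Int) := by simp; omega
        omega
      · rfl
    rw [List.foldl_cons, hb, ih]

-- A's recursion computes the stepF-fold over all subsets of all_lines[idx:m].
theorem backtrackFuel_char (all_lines : List (Int × Int)) (target : List Int) (n m : Int)
    (hm : m ≤ (all_lines.length : Int)) :
    ∀ (fuel : Nat) (idx : Int) (cur : List (Int × Int)) (mc : Int),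
      0 ≤ idx → idx ≤ m → (fuel : Int) = m - idx →
      backtrackFuel fuel all_lines idx target cur mc n m
        = (subsetsOf ((all_lines.take m.toNat).drop idx.toNat)).foldl (stepF n target cur) mc := by
  intro fuel
  induction fuel with
  | zero =>
    intro idx cur mc h0 h1 h2
    have hidx : idx = m := by omega
    have hdrop : (all_lines.take m.toNat).drop idx.toNat = [] := by
      apply List.eq_nil_of_length_eq_zero
      simp [List.length_take, List.length_drop]
      omega
    rw [hdrop]
    unfold backtrackFuel
    rw [if_pos hidx]
    simp [subsetsOf, stepF]
  | succ fuel ih =>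
    intro idx cur mc h0 h1 h2
    have hlt : idx < m := by omega
    have hlen : idx.toNat < all_lines.length := by omega
    have hwin : (all_lines.take m.toNat).drop idx.toNat
        = all_lines[idx.toNat] :: (all_lines.take m.toNat).drop (idx.toNat + 1) := by
      rw [List.drop_eq_getElem_cons (by simp [List.length_take]; omega)]
      congr 1
      exact List.getElem_take
    have hget : PySem.List.pyGet? all_lines idx = some all_lines[idx.toNat] := by
      rw [PySem.List.pyGet?_of_nonneg all_lines (by omega : (0:Int) ≤ idx)]
      exact List.getElem?_eq_getElem hlen
    have hnat : (idx + 1).toNat = idx.toNat + 1 := by omega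
    show backtrackFuel (fuel + 1) all_lines idx target cur mc n m = _
    rw [hwin]
    unfold backtrackFuel
    rw [if_neg (by omega)]
    by_cases hp : mc ≤ (cur.length : Int)
    · rw [if_pos hp]
      rw [foldl_stepF_const _ _ _ _ _ hp]
    · rw [if_neg hp]
      simp only [hget, Option.getD_some]
      rw [ih (idx + 1) (cur ++ [all_lines[idx.toNat]]) mc (by omega) (by omega) (by omega)]
      rw [ih (idx + 1) cur _ (by omega) (by omega) (by omega)]
      rw [hnat]
      rw [subsetsOf, List.foldl_append, List.foldl_map, foldl_stepF_map_cons]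

-- The filterMap over enumerate in B is pickBits.
theorem filterMap_enumerate_pick (l : List (Int × Int)) :
    ∀ (s : Nat) (mask : Nat),
      (PySem.List.enumerate l (s : Int)).filterMap
          (fun jl => if (mask >>> jl.1.toNat) % 2 = 1 then some jl.2 else none)
        = pickBits (mask >>> s) l := by
  induction l with
  | nil => intro s mask; simp [PySem.List.enumerate_nil, pickBits]
  | cons x xs ih =>
    intro s mask
    rw [PySem.List.enumerate_cons]
    have hcast : ((s : Int) + 1) = ((s + 1 : Nat) : Int) := by push_cast; ring
    rw [List.filterMap_cons, hcast, ih (s + 1) mask]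
    have hshift : mask >>> (s + 1) = (mask >>> s) / 2 := by
      simp [Nat.shiftRight_succ]
    simp only [Int.toNat_natCast, hshift, pickBits]
    by_cases hb : (mask >>> s) % 2 = 1 <;> simp [hb]

-- Evens then odds is a permutation of range(2*n).
theorem range_two_mul_perm (k : Nat) :
    (List.range (2 * k)).Perm
      ((List.range k).map (fun q => 2 * q) ++ (List.range k).map (fun q => 2 * q + 1)) := by
  rw [List.perm_ext_iff_of_nodup (List.nodup_range) ?_]
  · intro a
    simp only [List.mem_range, List.mem_append, List.mem_map]
    constructor
    · intro ha
      rcases Nat.even_or_odd a with ⟨q, hq⟩ | ⟨q, hq⟩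
      · exact Or.inl ⟨q, by omega, by omega⟩
      · exact Or.inr ⟨q, by omega, by omega⟩
    · rintro (⟨q, hq, rfl⟩ | ⟨q, hq, rfl⟩) <;> omega
  · apply List.Nodup.append
    · exact List.nodup_range.map (fun a b h => by omega)
    · exact List.nodup_range.map (fun a b h => by omega)
    · intro a ha hb
      simp only [List.mem_map, List.mem_range] at ha hb
      obtain ⟨q, _, rfl⟩ := ha
      obtain ⟨r, _, hr⟩ := hb
      omega

-- The mask enumeration produces a permutation of subsetsOf.
theorem masks_perm_subsets (l : List (Int × Int)) :
    ((List.range (2 ^ l.length)).map (fun mask => pickBits mask l)).Perm (subsetsOf l) := by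
  induction l with
  | nil => simp [pickBits, subsetsOf]
  | cons x xs ih =>
    have h2 : 2 ^ (x :: xs).length = 2 * 2 ^ xs.length := by
      simp [List.length_cons]; ring
    have he : ((List.range (2 ^ xs.length)).map (fun q => 2 * q) ++
          (List.range (2 ^ xs.length)).map (fun q => 2 * q + 1)).map (fun mask => pickBits mask (x :: xs))
        = ((List.range (2 ^ xs.length)).map (fun q => pickBits q xs)) ++
          ((List.range (2 ^ xs.length)).map (fun q => pickBits q xs)).map (x :: ·) := by
      simp only [List.map_append, List.map_map]
      congr 1
      · apply List.map_congr_left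
        intro q _
        show pickBits (2 * q) (x :: xs) = pickBits q xs
        have hmod : (2 * q) % 2 = 0 := by omega
        have hdiv : (2 * q) / 2 = q := by omega
        simp [pickBits, hmod, hdiv]
      · apply List.map_congr_left
        intro q _
        show pickBits (2 * q + 1) (x :: xs) = x :: pickBits q xs
        have hmod : (2 * q + 1) % 2 = 1 := by omega
        have hdiv : (2 * q + 1) / 2 = q := by omega
        simp [pickBits, hmod, hdiv]
    rw [h2]
    refine ((range_two_mul_perm (2 ^ xs.length)).map (fun mask => pickBits mask (x :: xs))).trans ?_
    rw [he]
    refine (List.Perm.append ih (ih.map (x :: ·))).trans ?_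
    exact List.perm_append_comm

-- B computes the stepF-fold over the mask-picked subsets of the window.
theorem backtrack_alt_char (all_lines : List (Int × Int)) (idx : Int) (target : List Int)
    (cur : List (Int × Int)) (mc : Int) (n m : Int) :
    backtrack_alt all_lines idx target cur mc n m
      = ((List.range (2 ^ (PySem.List.slice all_lines (some idx) (some m)).length)).map
          (fun mask => pickBits mask (PySem.List.slice all_lines (some idx) (some m)))).foldl
          (stepF n target cur) mc := by
  simp only [backtrack_alt]
  rw [List.foldl_map]
  congr 1
  funext b mask
  have h := filterMap_enumerate_pick (PySem.List.slice all_lines (some idx) (some m)) 0 mask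
  simp only [Nat.cast_zero, Nat.shiftRight_zero] at h
  simp only [h, stepF]
  split_ifs <;> omega

theorem stepF_comm (n : Int) (t : List Int) (cur : List (Int × Int)) (S T : List (Int × Int)) (b : Int) :
    stepF n t cur (stepF n t cur b S) T = stepF n t cur (stepF n t cur b T) S := by
  unfold stepF
  split <;> split <;> simp [min_assoc, min_comm, min_left_comm]

-- Fold over any permutation of the subset list gives the same minimum.
theorem foldl_stepF_perm (n : Int) (t : List Int) (cur : List (Int × Int)) (b : Int)
    {l₁ l₂ : List (List (Int × Int))} (h : l₁.Perm l₂) :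
    l₁.foldl (stepF n t cur) b = l₂.foldl (stepF n t cur) b :=
  h.foldl_eq' (fun S _ T _ z => stepF_comm n t cur S T z) b

theorem slice_self_eq_nil (xs : List (Int × Int)) (a : Int) :
    PySem.List.slice xs (some a) (some a) = [] := by
  apply List.eq_nil_of_length_eq_zero
  rw [PySem.List.length_slice]
  omega

-- ===== VERDICT (by name: the statement is the Claim_ definition above) =====
theorem backtrack_spec : Claim_equal_backtrack := by
  intro all_lines idx target cur_lines min_cost n m _ hpre
  unfold Spec_backtrack
  obtain ⟨_, hcase⟩ := hpre
  rw [backtrack_alt_char]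
  rcases hcase with hidx | hprune | ⟨h0, h1, h2⟩
  · -- idx == m: the window is empty, both sides test cur_lines alone
    subst hidx
    rw [slice_self_eq_nil]
    unfold backtrack backtrackFuel
    rw [if_pos rfl]
    simp [pickBits, stepF]
  · -- pruned call: every candidate is at least as long as cur_lines, both return min_cost
    by_cases hidx : idx = m
    · subst hidx
      rw [slice_self_eq_nil]
      unfold backtrack backtrackFuel
      rw [if_pos rfl]
      simp [pickBits, stepF]
    · rw [foldl_stepF_const _ _ _ _ _ hprune]
      unfold backtrack backtrackFuel
      rw [if_neg hidx, if_pos hprune]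
  · -- main case 0 ≤ idx ≤ m ≤ len: A folds over subsetsOf, B over a permutation of it
    have hslice : PySem.List.slice all_lines (some idx) (some m)
        = (all_lines.take m.toNat).drop idx.toNat := by
      rw [PySem.List.slice_toNat all_lines h0 (by omega : (0:Int) ≤ m), List.drop_take]
    rw [hslice]
    rw [foldl_stepF_perm n target cur_lines min_cost (masks_perm_subsets _)]
    unfold backtrack
    exact backtrackFuel_char all_lines target n m h2 ((m - idx).toNat) idx cur_lines min_cost h0 h1 (by omega)
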